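-- pv_equiv track=rewrite | github.com/pypi-data/pypi-mirror-390 | packages/fryweb/fryweb-0.3.11-py3-none-any.whl/fryweb/css/plugin.py | prepare_utilities
-- ===== SOURCE A (Python) =====
-- def prepare_utilities(utilities):
--     newlist = []
--     newdict = {}
--     def add(n, v):
--         n = n.strip()
--         if ':' in n:
--             raise RuntimeError(f"Custom utility should not has modifiers: '{n}'")
--         if not n in newdict:
--             newdict[n] = v
--             newlist.append((n,v))
--         else:
--             newdict[n] += v
--     for name, *value in utilities:
--         if ',' in name:
--             for n in name.split(','):
--                 add(n, value[:])
--         else: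
--             add(name, value)
--     return newlist
-- ===== SOURCE B (Python) =====
-- def prepare_utilities(utilities):
--     # Staged passes: flatten to (stripped-name, values) pairs, then compute the
--     # first-seen name order, then gather each name's values by scanning the flat list.
--     pairs = []
--     for name, *value in utilities:
--         for n in (name.split(',') if ',' in name else [name]):
--             n = n.strip()
--             if ':' in n:
--                 raise RuntimeError(f"Custom utility should not has modifiers: '{n}'")
--             pairs.append((n, value))
--     names = []
--     for n, _ in pairs:
--         if n not in names:
--             names.append(n)
--     return [(n, [x for m, v in pairs if m == n for x in v]) for n in names]
-- ===== Notes on version B (the rewrite author's own statement) =====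
-- stated objective: alternative
-- what changed: Replaces A's single pass that keeps a parallel list and dict synchronized through in-place list aliasing with three staged passes: flatten the input into (stripped name, values) pairs, compute the first-seen name order by dedup, then gather each name's values by scanning the flat pair list (quadratic brute-force grouping instead of incremental dict accumulation).
import Mathlib
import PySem

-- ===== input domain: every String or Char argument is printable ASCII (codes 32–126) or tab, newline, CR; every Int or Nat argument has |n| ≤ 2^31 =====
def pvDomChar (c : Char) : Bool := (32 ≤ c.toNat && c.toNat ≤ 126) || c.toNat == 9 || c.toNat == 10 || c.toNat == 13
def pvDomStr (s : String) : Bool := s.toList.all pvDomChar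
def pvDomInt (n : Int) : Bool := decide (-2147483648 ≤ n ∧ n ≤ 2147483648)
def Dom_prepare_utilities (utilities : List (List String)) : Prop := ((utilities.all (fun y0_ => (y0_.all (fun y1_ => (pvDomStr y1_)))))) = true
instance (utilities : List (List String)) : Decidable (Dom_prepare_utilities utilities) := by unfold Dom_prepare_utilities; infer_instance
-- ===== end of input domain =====

-- B replaces A's synchronized list+dict single pass (kept consistent through in-place list
-- aliasing) by three staged passes — flatten to (stripped name, values) pairs, dedup the names
-- in first-seen order, then gather each name's values by rescanning the flat list; objective: alternative.


-- shared primitive wrapper: Python's s.split(',') (PySem has Chars.splitOn; sep "," is non-empty, exact)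
def pvSplitComma (s : String) : List String :=
  (PySem.Chars.splitOn s.toList [',']).map String.ofList

-- ===== PORT A =====
-- A's helper 'add' over the mutable state (newlist, newdict). 'newdict[n] += v' mutates the list
-- object that newlist's entry shares (aliasing), so the port updates both components.
-- The RuntimeError branch (':' in the stripped name) is excluded by Pre_prepare_utilities.
def pvAddA (st : List (String × List String) × PySem.Dict String (List String))
    (n : String) (v : List String) :
    List (String × List String) × PySem.Dict String (List String) :=
  let m := PySem.Str.strip n
  if st.2.contains m = false then
    (st.1 ++ [(m, v)], st.2.insert m v)
  else
    (st.1.map (fun p => if p.1 == m then (p.1, p.2 ++ v) else p), st.2.modify m [] (· ++ v))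

def prepare_utilities (utilities : List (List String)) : List (String × List String) :=
  (utilities.foldl
    (fun st row =>
      let name := row.headD ""   -- 'name, *value = row'; Pre_ guarantees row ≠ []
      let value := row.tail
      if PySem.Str.isIn "," name then
        (pvSplitComma name).foldl (fun st n => pvAddA st n value) st
      else
        pvAddA st name value)
    ([], PySem.Dict.empty)).1

-- ===== PORT B =====
-- B stage 1: flatten into (stripped name, values) pairs (the ':' raise is excluded by Pre_).
def pvFlatPairs (utilities : List (List String)) : List (String × List String) :=
  utilities.foldl
    (fun acc row =>
      let name := row.headD ""
      let value := row.tail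
      (if PySem.Str.isIn "," name then pvSplitComma name else [name]).foldl
        (fun acc n => acc ++ [(PySem.Str.strip n, value)]) acc)
    []

def prepare_utilities_alt (utilities : List (List String)) : List (String × List String) :=
  let pairs := pvFlatPairs utilities
  -- stage 2: first-seen order of the names
  let names := pairs.foldl (fun ns p => if ns.contains p.1 then ns else ns ++ [p.1]) []
  -- stage 3: gather each name's values by scanning the flat list
  names.map (fun n => (n, pairs.flatMap (fun p => if p.1 == n then p.2 else [])))

-- ===== PRECONDITION & SPEC =====
-- Pre_ excludes exactly the inputs where A raises: an empty row (ValueError from unpacking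
-- 'name, *value = row') or a row whose name contains ':' (A's explicit RuntimeError).
def Pre_prepare_utilities (utilities : List (List String)) : Prop :=
  ∀ row ∈ utilities, row ≠ [] ∧ PySem.Str.isIn ":" (row.headD "") = false

instance (utilities : List (List String)) : Decidable (Pre_prepare_utilities utilities) := by
  unfold Pre_prepare_utilities; infer_instance

def pvWitness_prepare_utilities : List (List String) :=
  [["m-1", "margin", "0.25rem"], ["p-1 , m-1", "padding"], ["m-1"]]

def Spec_prepare_utilities (utilities : List (List String)) (out : List (String × List String)) : Prop := out = prepare_utilities_alt utilities
instance (utilities : List (List String)) (out : List (String × List String)) : Decidable (Spec_prepare_utilities utilities out) := by unfold Spec_prepare_utilities; infer_instance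

-- ===== CLAIM (what is proved, stated in full; the proofs are below) =====
def Claim_equal_prepare_utilities : Prop := ∀ (utilities : List (List String)), Dom_prepare_utilities utilities → Pre_prepare_utilities utilities → Spec_prepare_utilities utilities (prepare_utilities utilities)

-- ===== LEMMAS AND PROOFS =====

-- the per-row flat entries (still unstripped names before the map applies strip)
def pvRowPairs (row : List String) : List (String × List String) :=
  (if PySem.Str.isIn "," (row.headD "") then pvSplitComma (row.headD "") else [row.headD ""]).map
    (fun n => (PySem.Str.strip n, row.tail))

-- one step of A restricted to the list component (on an already-stripped pair)
def pvListAdd (l : List (String × List String)) (p : String × List String) :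
    List (String × List String) :=
  if l.any (fun q => q.1 == p.1) then
    l.map (fun q => if q.1 == p.1 then (q.1, q.2 ++ p.2) else q)
  else l ++ [p]

-- B's stage-2/3 grouping abstracted over the flat pair list
def pvNames (ps : List (String × List String)) : List String :=
  ps.foldl (fun ns p => if ns.contains p.1 then ns else ns ++ [p.1]) []

def pvGather (ps : List (String × List String)) (n : String) : List String :=
  ps.flatMap (fun p => if p.1 == n then p.2 else [])

def pvGroup (ps : List (String × List String)) : List (String × List String) :=
  (pvNames ps).map (fun n => (n, pvGather ps n))

-- A's dict and list stay synchronized: the dict contains exactly the list's keys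
def pvGood (st : List (String × List String) × PySem.Dict String (List String)) : Prop :=
  ∀ m, st.2.contains m = st.1.any (fun q => q.1 == m)

theorem pvAddA_fst (st : List (String × List String) × PySem.Dict String (List String))
    (h : pvGood st) (n : String) (v : List String) :
    (pvAddA st n v).1 = pvListAdd st.1 (PySem.Str.strip n, v) ∧ pvGood (pvAddA st n v) := by
  unfold pvAddA pvListAdd
  rcases hc : st.2.contains (PySem.Str.strip n) with _ | _
  · have hl : st.1.any (fun q => q.1 == PySem.Str.strip n) = false := by rw [← h]; exact hc
    simp only [hc, hl]
    rw [if_pos trivial]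
    refine ⟨rfl, fun m => ?_⟩
    rw [PySem.Dict.contains_insert, h m]
    simp [List.any_append, Bool.or_comm, BEq.comm (a := m) (b := PySem.Str.strip n)]
  · have hl : st.1.any (fun q => q.1 == PySem.Str.strip n) = true := by rw [← h]; exact hc
    simp only [hc, hl]
    rw [if_neg (by simp), if_pos trivial]
    refine ⟨rfl, fun m => ?_⟩
    rw [PySem.Dict.contains_modify, h m, List.any_map]
    have hkey : st.1.any ((fun q => q.1 == m) ∘ fun p =>
        if (p.1 == PySem.Str.strip n) = true then (p.1, p.2 ++ v) else p)
        = st.1.any (fun q => q.1 == m) := by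
      apply PySem.List.any_congr_mem
      intro q _
      by_cases hq : q.1 = PySem.Str.strip n <;> simp [hq]
    rw [hkey]
    by_cases hm : m = PySem.Str.strip n
    · subst hm; simp [hl]
    · simp [show (m == PySem.Str.strip n) = false by simp [hm]]

-- the inner fold over a row's names equals folding pvListAdd over that row's stripped pairs
theorem pvInner_fold (names : List String) (v : List String) :
    ∀ st, pvGood st →
      (names.foldl (fun st n => pvAddA st n v) st).1
        = (names.map (fun n => (PySem.Str.strip n, v))).foldl pvListAdd st.1
      ∧ pvGood (names.foldl (fun st n => pvAddA st n v) st) := by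
  induction names with
  | nil => intro st h; exact ⟨rfl, h⟩
  | cons n names ih =>
    intro st h
    obtain ⟨h1, h2⟩ := pvAddA_fst st h n v
    simp only [List.foldl_cons, List.map_cons]
    obtain ⟨ih1, ih2⟩ := ih (pvAddA st n v) h2
    exact ⟨by rw [ih1, h1], ih2⟩

-- the whole of A's loop equals folding pvListAdd over the flattened pair list
theorem pvA_fold (utilities : List (List String)) :
    ∀ st, pvGood st →
      (utilities.foldl
        (fun st row =>
          let name := row.headD ""
          let value := row.tail
          if PySem.Str.isIn "," name then
            (pvSplitComma name).foldl (fun st n => pvAddA st n value) st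
          else
            pvAddA st name value)
        st).1
      = (utilities.flatMap pvRowPairs).foldl pvListAdd st.1 := by
  induction utilities with
  | nil => intro st _; rfl
  | cons row rows ih =>
    intro st h
    simp only [List.foldl_cons, List.flatMap_cons, List.foldl_append]
    by_cases hc : PySem.Str.isIn "," (row.headD "") = true
    · obtain ⟨h1, h2⟩ := pvInner_fold (pvSplitComma (row.headD "")) row.tail st h
      rw [if_pos hc, ih _ h2, h1, pvRowPairs, if_pos hc]
    · obtain ⟨h1, h2⟩ := pvAddA_fst st h (row.headD "") row.tail
      rw [if_neg hc, ih _ h2, h1, pvRowPairs, if_neg hc]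
      rfl

-- B's stage 1 builds exactly that flattened pair list
theorem pvFlatPairs_eq (utilities : List (List String)) :
    pvFlatPairs utilities = utilities.flatMap pvRowPairs := by
  unfold pvFlatPairs
  have h1 : utilities.foldl
      (fun acc row =>
        (if PySem.Str.isIn "," (row.headD "") then pvSplitComma (row.headD "") else [row.headD ""]).foldl
          (fun acc n => acc ++ [(PySem.Str.strip n, row.tail)]) acc) []
      = utilities.foldl (fun acc row => acc ++ pvRowPairs row) [] := by
    apply PySem.List.foldl_congr_mem
    intro acc row _
    rw [PySem.List.foldl_append_singleton_eq_map]
    rfl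
  rw [h1, PySem.List.foldl_append_eq_flatMap]
  rfl

theorem pvMem_names (ps : List (String × List String)) (x : String) :
    x ∈ pvNames ps ↔ x ∈ ps.map Prod.fst := by
  have h : pvNames ps = PySem.Set.ofList (ps.map Prod.fst) := by
    rw [PySem.Set.ofList_eq_foldl, List.foldl_map]; rfl
  rw [h, PySem.Set.mem_ofList]

theorem pvNames_append_singleton (ps : List (String × List String)) (p : String × List String) :
    pvNames (ps ++ [p])
      = if (pvNames ps).contains p.1 then pvNames ps else pvNames ps ++ [p.1] := by
  unfold pvNames; rw [List.foldl_append]; rfl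

theorem pvGather_append_singleton (ps : List (String × List String)) (p : String × List String)
    (n : String) :
    pvGather (ps ++ [p]) n = pvGather ps n ++ (if p.1 == n then p.2 else []) := by
  unfold pvGather; rw [List.flatMap_append]; simp

-- the key step: one pvListAdd on a grouped prefix regroups the extended prefix
theorem pvListAdd_group (ps : List (String × List String)) (p : String × List String) :
    pvListAdd (pvGroup ps) p = pvGroup (ps ++ [p]) := by
  unfold pvListAdd pvGroup
  have hany : (((pvNames ps).map (fun n => (n, pvGather ps n))).any (fun q => q.1 == p.1))
      = (pvNames ps).contains p.1 := by
    rw [List.any_map]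
    simp only [Function.comp_def]
    exact List.any_beq'
  by_cases hc : p.1 ∈ pvNames ps
  · have hcb : (pvNames ps).contains p.1 = true := by simpa using hc
    rw [hany, hcb, if_pos rfl, pvNames_append_singleton, hcb, if_pos rfl, List.map_map]
    apply List.map_congr_left
    intro n _
    by_cases hn : n = p.1
    · simp [hn, pvGather_append_singleton]
    · simp [hn, pvGather_append_singleton, Ne.symm hn]
  · have hcb : (pvNames ps).contains p.1 = false := by simpa using hc
    rw [hany, hcb, pvNames_append_singleton, hcb]
    simp only [Bool.false_eq_true, if_false, List.map_append]
    congr 1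
    · apply List.map_congr_left
      intro n hn
      have hne : p.1 ≠ n := fun h => hc (h ▸ hn)
      simp [pvGather_append_singleton, hne]
    · have hg : pvGather ps p.1 = [] := by
        rw [pvGather, List.flatMap_eq_nil_iff]
        intro q hq
        have hne : q.1 ≠ p.1 := by
          intro h
          exact hc ((pvMem_names ps p.1).mpr (h ▸ List.mem_map_of_mem (f := Prod.fst) hq))
        simp [hne]
      simp [pvGather_append_singleton, hg]

theorem pvFold_group (ps : List (String × List String)) :
    ∀ qs, ps.foldl pvListAdd (pvGroup qs) = pvGroup (qs ++ ps) := by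
  induction ps with
  | nil => intro qs; simp
  | cons p ps ih =>
    intro qs
    rw [List.foldl_cons, pvListAdd_group, ih (qs ++ [p])]
    simp

-- ===== VERDICT (by name: the statement is the Claim_ definition above) =====
theorem prepare_utilities_spec : Claim_equal_prepare_utilities := by
  intro utilities _ _
  unfold Spec_prepare_utilities prepare_utilities
  rw [pvA_fold utilities ([], PySem.Dict.empty) (fun m => by simp [PySem.Dict.contains_empty])]
  calc (utilities.flatMap pvRowPairs).foldl pvListAdd ([], (PySem.Dict.empty : PySem.Dict String (List String))).1
      = pvGroup ([] ++ utilities.flatMap pvRowPairs) := pvFold_group _ []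
    _ = pvGroup (pvFlatPairs utilities) := by rw [List.nil_append, pvFlatPairs_eq]
    _ = prepare_utilities_alt utilities := by rw [prepare_utilities_alt, pvFlatPairs_eq]; rfl
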